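-- pv_equiv track=rewrite | github.com/neardws/token-sisyphus | evolve.py | apply_search_replace
-- ===== SOURCE A (Python) =====
-- def apply_search_replace(original: str, patch_text: str) -> tuple[str, int]:
--     """
--     Apply SEARCH/REPLACE blocks to original source.
--     Returns (patched_text, n_applied).
--     Each block format:
--         SEARCH:
--         <exact lines>
--         REPLACE:
--         <new lines>
--         END
--     """
--     result = original
--     applied = 0
--
--     # Parse blocks
--     blocks = []
--     i = 0
--     lines = patch_text.splitlines()
--     while i < len(lines):
--         if lines[i].strip() == "SEARCH:":
--             search_lines = []
--             i += 1
--             while i < len(lines) and lines[i].strip() != "REPLACE:":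
--                 search_lines.append(lines[i])
--                 i += 1
--             replace_lines = []
--             i += 1  # skip REPLACE:
--             while i < len(lines) and lines[i].strip() != "END":
--                 replace_lines.append(lines[i])
--                 i += 1
--             blocks.append(("\n".join(search_lines), "\n".join(replace_lines)))
--         i += 1
--
--     for search, replace in blocks:
--         if search in result:
--             result = result.replace(search, replace, 1)
--             applied += 1
--
--     return result, applied
-- ===== SOURCE B (Python) =====
-- def apply_search_replace(original: str, patch_text: str) -> tuple[str, int]:
--     """
--     Apply SEARCH/REPLACE blocks to original source.
--     Returns (patched_text, n_applied).
--     """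
--     # Parse with a flat state machine: 0 = outside, 1 = in SEARCH, 2 = in REPLACE.
--     blocks = []
--     state = 0
--     search_lines = []
--     replace_lines = []
--     for line in patch_text.splitlines():
--         if state == 0:
--             if line.strip() == "SEARCH:":
--                 state, search_lines, replace_lines = 1, [], []
--         elif state == 1:
--             if line.strip() == "REPLACE:":
--                 state = 2
--             else:
--                 search_lines.append(line)
--         else:
--             if line.strip() == "END":
--                 blocks.append(("\n".join(search_lines), "\n".join(replace_lines)))
--                 state = 0
--             else:
--                 replace_lines.append(line)
--     if state != 0:
--         blocks.append(("\n".join(search_lines), "\n".join(replace_lines)))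
--
--     result = original
--     applied = 0
--     for search, replace in blocks:
--         if search in result:
--             result = result.replace(search, replace, 1)
--             applied += 1
--     return result, applied
-- ===== Notes on version B (the rewrite author's own statement) =====
-- stated objective: simpler
-- what changed: The index-based nested while loops of the parser are replaced by a single flat for-loop over the lines driven by an explicit outside/in-search/in-replace state variable, with a final flush for a pending block; the application loop is unchanged.
import Mathlib
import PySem

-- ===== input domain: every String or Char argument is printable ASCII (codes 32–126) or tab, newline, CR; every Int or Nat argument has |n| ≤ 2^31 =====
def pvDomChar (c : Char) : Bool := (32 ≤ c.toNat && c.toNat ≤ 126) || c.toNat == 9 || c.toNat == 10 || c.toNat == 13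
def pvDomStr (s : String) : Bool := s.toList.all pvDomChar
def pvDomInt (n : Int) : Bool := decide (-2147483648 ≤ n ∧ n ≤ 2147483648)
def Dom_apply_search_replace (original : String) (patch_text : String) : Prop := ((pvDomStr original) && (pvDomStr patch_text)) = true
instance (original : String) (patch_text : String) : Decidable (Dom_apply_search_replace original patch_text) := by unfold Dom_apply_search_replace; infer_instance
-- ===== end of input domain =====

-- B replaces A's index-based nested while-loop parser with a flat for-loop state machine
-- (outside / in-search / in-replace) plus an end-of-input flush; same application loop (objective: simpler).


-- shared helper for the line 'result = result.replace(search, replace, 1)' (same line in both Pythons):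
-- PySem.Str.replace has no count argument, so count-1 replace is ported by hand via find; it is exact
-- here because both programs guard it with 'search in result', so the first occurrence exists (find ≥ 0).
def pvReplaceOnce (s old new : String) : String :=
  let i := (PySem.Str.find s old).toNat
  String.ofList (s.toList.take i ++ new.toList ++ s.toList.drop (i + old.toList.length))

-- ===== PORT A =====
-- inner while loop collecting search_lines until a 'REPLACE:' line (returns them and the rest AFTER it)
def pvCollectS : List String → List String × List String
  | [] => ([], [])
  | l :: t =>
    if PySem.Str.strip l = "REPLACE:" then ([], t)
    else
      let r := pvCollectS t
      (l :: r.1, r.2)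

-- inner while loop collecting replace_lines until an 'END' line (returns them and the rest AFTER it)
def pvCollectR : List String → List String × List String
  | [] => ([], [])
  | l :: t =>
    if PySem.Str.strip l = "END" then ([], t)
    else
      let r := pvCollectR t
      (l :: r.1, r.2)

theorem pvCollectS_len : ∀ ls : List String, (pvCollectS ls).2.length ≤ ls.length := by
  intro ls
  induction ls with
  | nil => simp [pvCollectS]
  | cons l t ih =>
    simp only [pvCollectS]
    split
    · simp
    · simpa using Nat.le_succ_of_le ih

theorem pvCollectR_len : ∀ ls : List String, (pvCollectR ls).2.length ≤ ls.length := by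
  intro ls
  induction ls with
  | nil => simp [pvCollectR]
  | cons l t ih =>
    simp only [pvCollectR]
    split
    · simp
    · simpa using Nat.le_succ_of_le ih

-- A's outer while loop over the line index
def pvParseA : List String → List (String × String)
  | [] => []
  | l :: t =>
    if PySem.Str.strip l = "SEARCH:" then
      let s := pvCollectS t
      let r := pvCollectR s.2
      (PySem.Str.join "\n" s.1, PySem.Str.join "\n" r.1) :: pvParseA r.2
    else pvParseA t
  termination_by ls => ls.length
  decreasing_by
    · exact Nat.lt_succ_of_le (Nat.le_trans (pvCollectR_len _) (pvCollectS_len t))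
    · simp

def apply_search_replace (original : String) (patch_text : String) : String × Int :=
  let blocks := pvParseA (PySem.Str.splitlines patch_text)
  blocks.foldl
    (fun st b =>
      if PySem.Str.isIn b.1 st.1 then (pvReplaceOnce st.1 b.1 b.2, st.2 + 1) else st)
    (original, 0)

-- ===== PORT B =====
-- state machine step: (blocks, state, search_lines, replace_lines); state 0 outside, 1 search, 2 replace
def pvStepB (st : List (String × String) × Nat × List String × List String) (line : String) :
    List (String × String) × Nat × List String × List String :=
  let (blocks, mode, sl, rl) := st
  if mode = 0 then
    if PySem.Str.strip line = "SEARCH:" then (blocks, 1, [], []) else (blocks, mode, sl, rl)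
  else if mode = 1 then
    if PySem.Str.strip line = "REPLACE:" then (blocks, 2, sl, rl)
    else (blocks, 1, sl ++ [line], rl)
  else
    if PySem.Str.strip line = "END" then
      (blocks ++ [(PySem.Str.join "\n" sl, PySem.Str.join "\n" rl)], 0, sl, rl)
    else (blocks, mode, sl, rl ++ [line])

-- end-of-input flush: 'if state != 0: blocks.append(...)'
def pvFlushB (st : List (String × String) × Nat × List String × List String) :
    List (String × String) :=
  if st.2.1 ≠ 0 then st.1 ++ [(PySem.Str.join "\n" st.2.2.1, PySem.Str.join "\n" st.2.2.2)]
  else st.1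

def apply_search_replace_alt (original : String) (patch_text : String) : String × Int :=
  let blocks := pvFlushB ((PySem.Str.splitlines patch_text).foldl pvStepB ([], 0, [], []))
  blocks.foldl
    (fun st b =>
      if PySem.Str.isIn b.1 st.1 then (pvReplaceOnce st.1 b.1 b.2, st.2 + 1) else st)
    (original, 0)

-- ===== PRECONDITION & SPEC =====
def Spec_apply_search_replace (original : String) (patch_text : String) (out : String × Int) : Prop := out = apply_search_replace_alt original patch_text
instance (original : String) (patch_text : String) (out : String × Int) : Decidable (Spec_apply_search_replace original patch_text out) := by unfold Spec_apply_search_replace; infer_instance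

-- ===== CLAIM (what is proved, stated in full; the proofs are below) =====
def Claim_equal_apply_search_replace : Prop := ∀ (original : String) (patch_text : String), Dom_apply_search_replace original patch_text → Spec_apply_search_replace original patch_text (apply_search_replace original patch_text)

-- ===== LEMMAS AND PROOFS =====

-- G blocks m s r rs: run B's state machine from the given state over rs and flush
def pvG (blocks : List (String × String)) (m : Nat) (s r : List String) (rs : List String) :
    List (String × String) :=
  pvFlushB (rs.foldl pvStepB (blocks, m, s, r))

theorem pvStepB_eval0 (blocks : List (String × String)) (s r : List String) (line : String) :
    pvStepB (blocks, 0, s, r) line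
      = if PySem.Str.strip line = "SEARCH:" then (blocks, 1, [], []) else (blocks, 0, s, r) := by
  simp [pvStepB]

theorem pvStepB_eval1 (blocks : List (String × String)) (s r : List String) (line : String) :
    pvStepB (blocks, 1, s, r) line
      = if PySem.Str.strip line = "REPLACE:" then (blocks, 2, s, r) else (blocks, 1, s ++ [line], r) := by
  simp [pvStepB]

theorem pvStepB_eval2 (blocks : List (String × String)) (s r : List String) (line : String) :
    pvStepB (blocks, 2, s, r) line
      = if PySem.Str.strip line = "END" then
          (blocks ++ [(PySem.Str.join "\n" s, PySem.Str.join "\n" r)], 0, s, r)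
        else (blocks, 2, s, r ++ [line]) := by
  simp [pvStepB]

-- in state 0 the carried line buffers are irrelevant (they are reset at the next SEARCH:)
theorem pvG_zero_lists (rs : List String) :
    ∀ blocks s r s' r', pvG blocks 0 s r rs = pvG blocks 0 s' r' rs := by
  induction rs with
  | nil => intro blocks s r s' r'; simp [pvG, pvFlushB]
  | cons l t ih =>
    intro blocks s r s' r'
    by_cases hc : PySem.Str.strip l = "SEARCH:"
    · simp only [pvG, List.foldl_cons, pvStepB_eval0, if_pos hc]
    · simp only [pvG, List.foldl_cons, pvStepB_eval0, if_neg hc]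
      exact ih blocks s r s' r'

-- state 1 runs like A's search-collecting inner loop
theorem pvG_one (rs : List String) :
    ∀ blocks s r, pvG blocks 1 s r rs
      = pvG blocks 2 (s ++ (pvCollectS rs).1) r (pvCollectS rs).2 := by
  induction rs with
  | nil => intro blocks s r; simp [pvG, pvCollectS, pvFlushB]
  | cons l t ih =>
    intro blocks s r
    by_cases hc : PySem.Str.strip l = "REPLACE:"
    · simp only [pvG, List.foldl_cons, pvStepB_eval1, if_pos hc, pvCollectS, List.append_nil]
    · simp only [pvG, List.foldl_cons, pvStepB_eval1, if_neg hc, pvCollectS]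
      have := ih blocks (s ++ [l]) r
      simp only [pvG] at this
      simp only [this, List.append_assoc, List.singleton_append]

-- state 2 runs like A's replace-collecting inner loop, emits the block and returns to state 0
theorem pvG_two (rs : List String) :
    ∀ blocks s r, pvG blocks 2 s r rs
      = pvG (blocks ++ [(PySem.Str.join "\n" s, PySem.Str.join "\n" (r ++ (pvCollectR rs).1))])
            0 s r (pvCollectR rs).2 := by
  induction rs with
  | nil => intro blocks s r; simp [pvG, pvCollectR, pvFlushB]
  | cons l t ih =>
    intro blocks s r
    by_cases hc : PySem.Str.strip l = "END"
    · simp only [pvG, List.foldl_cons, pvStepB_eval2, if_pos hc, pvCollectR, List.append_nil]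
    · simp only [pvG, List.foldl_cons, pvStepB_eval2, if_neg hc, pvCollectR]
      have := ih blocks s (r ++ [l])
      simp only [pvG] at this
      simp only [this, List.append_assoc, List.singleton_append]
      exact pvG_zero_lists _ _ _ _ _ _

-- main invariant: from state 0, B's machine produces exactly A's block list
theorem pvG_parse : ∀ (n : Nat) (rs : List String), rs.length ≤ n →
    ∀ blocks s r, pvG blocks 0 s r rs = blocks ++ pvParseA rs := by
  intro n
  induction n with
  | zero =>
    intro rs h blocks s r
    have : rs = [] := List.eq_nil_of_length_eq_zero (Nat.le_zero.mp h)
    subst this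
    simp [pvG, pvFlushB, pvParseA]
  | succ n ih =>
    intro rs h blocks s r
    match rs with
    | [] => simp [pvG, pvFlushB, pvParseA]
    | l :: t =>
      have ht : t.length ≤ n := Nat.lt_succ_iff.mp (by simpa using h)
      by_cases hc : PySem.Str.strip l = "SEARCH:"
      · -- SEARCH: line: enter state 1, then collectS / collectR, then back to state 0
        have h1 := pvG_one t blocks [] []
        have h2 := pvG_two (pvCollectS t).2 blocks (pvCollectS t).1 []
        have hlen : (pvCollectR (pvCollectS t).2).2.length ≤ n :=
          Nat.le_trans (Nat.le_trans (pvCollectR_len _) (pvCollectS_len t)) ht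
        have h3 := ih (pvCollectR (pvCollectS t).2).2 hlen
          (blocks ++ [(PySem.Str.join "\n" (pvCollectS t).1,
                       PySem.Str.join "\n" (pvCollectR (pvCollectS t).2).1)])
          (pvCollectS t).1 []
        simp only [List.nil_append] at h1 h2
        simp only [pvG, List.foldl_cons, pvStepB_eval0, if_pos hc]
        simp only [pvG] at h1 h2 h3
        rw [h1, h2, h3, pvParseA, if_pos hc]
        simp
      · -- other line: skipped by both
        have := ih t ht blocks s r
        simp only [pvG] at this ⊢
        simp only [List.foldl_cons, pvStepB_eval0, if_neg hc]
        rw [this, pvParseA, if_neg hc]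

-- ===== VERDICT (by name: the statement is the Claim_ definition above) =====
theorem apply_search_replace_spec : Claim_equal_apply_search_replace := by
  intro original patch_text _
  unfold Spec_apply_search_replace apply_search_replace apply_search_replace_alt
  have h := pvG_parse (PySem.Str.splitlines patch_text).length
    (PySem.Str.splitlines patch_text) (Nat.le_refl _) [] [] []
  simp only [pvG, List.nil_append] at h
  rw [h]
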